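-- pv_equiv track=rewrite | github.com/vkorey/tasks | sort_letters.py | sort_letters_2
-- ===== SOURCE A (Python) =====
-- from collections import Counter
--
-- def sort_letters_2(text):
--     """
--     python3 -m doctest <filename>
--
--     Return a string of the same letters where all the letters are sorted by
--     its frequency in descending order. In case of equal frequency letters
--     should go in the order they were met in the original string.
--     >>> sort_letters_2('aaabccccdeefffff')
--     'fffffccccaaaeebd'
--     >>> sort_letters_2('abcdefghijklmnop')
--     'abcdefghijklmnop'
--     >>> sort_letters('')
--     ''
--     >>> sort_letters_2('aba')
--     'aab'
--     >>> sort_letters_2('abcabccba')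
--     'aaabbbccc'
--     """
--     # 1. count all letters
--     count_letters = Counter(text)  # O(n)
--     # advanced py3.6
--     index_by_letter = {}
--     for i, letter in enumerate(text):  # O(n)
--         if letter not in index_by_letter:
--             index_by_letter[letter] = i
--
--     # 2. starting from the most frequent letter
--     pairs = count_letters.items()  # O(m)
--
--     reversed_pairs = [(f, -index_by_letter[l], l) for l, f in pairs]  # O(m)
--     sorted_pairs = sorted(reversed_pairs, reverse=True)  # O(m * ln(m))
--     result = []
--     #  - repeat letter several times
--     for freq, _, letter in sorted_pairs:  # O(m)
--         result.append(letter * freq)  # O(1)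
--     # 3. combine result
--     return ''.join(result)  # O(m * ln(m) + 3 * m + n)
-- ===== SOURCE B (Python) =====
-- def sort_letters_2(text):
--     # Counting-sort style: no comparison sort at all.  Count letters once,
--     # then sweep frequencies from the maximum down to 1, emitting at each
--     # frequency the letters that occur that often, in first-occurrence order
--     # (dict insertion order).
--     counts = {}
--     for ch in text:
--         counts[ch] = counts.get(ch, 0) + 1
--     maxf = max(counts.values(), default=0)
--     parts = []
--     for f in range(maxf, 0, -1):
--         for ch in counts:
--             if counts[ch] == f:
--                 parts.append(ch * f)
--     return ''.join(parts)
-- ===== Notes on version B (the rewrite author's own statement) =====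
-- stated objective: alternative
-- what changed: Replaces A's comparison sort of (freq, -first-index, letter) tuples (with a separate first-index pass) by a sort-free counting-sort sweep: count letters in a plain dict, then iterate the frequency value from the maximum down to 1 and emit, at each frequency, the letters with exactly that count in dict insertion (= first-occurrence) order.
import Mathlib
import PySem

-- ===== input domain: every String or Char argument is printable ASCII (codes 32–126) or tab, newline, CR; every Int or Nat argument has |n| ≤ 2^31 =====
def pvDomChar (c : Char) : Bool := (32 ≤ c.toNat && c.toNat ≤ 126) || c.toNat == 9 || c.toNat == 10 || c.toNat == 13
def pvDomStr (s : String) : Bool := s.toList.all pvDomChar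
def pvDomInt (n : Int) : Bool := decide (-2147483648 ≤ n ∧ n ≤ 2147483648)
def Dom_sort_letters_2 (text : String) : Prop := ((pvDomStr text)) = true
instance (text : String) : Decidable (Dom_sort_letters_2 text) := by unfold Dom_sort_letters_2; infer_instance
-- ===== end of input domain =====

-- B replaces A's comparison sort of (freq, -index, letter) tuples by a sort-free counting
-- sweep: count letters, then emit letters per frequency from the maximum down (objective: alternative).


-- ===== PORT A =====
def sort_letters_2 (text : String) : String :=
  let count_letters := PySem.Dict.counter text.toList
  let index_by_letter : PySem.Dict Char Int :=
    (PySem.List.enumerate text.toList 0).foldl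
      (fun d p => if !(d.contains p.2) then d.insert p.2 p.1 else d) PySem.Dict.empty
  let pairs := count_letters.items
  -- index_by_letter[l]: every counter key occurs in text, so the lookup never raises;
  -- getD's default 0 is therefore never used
  let reversed_pairs := pairs.map (fun lf => (lf.2, -(index_by_letter.getD lf.1 0), lf.1))
  -- Python sorts the (freq, -index, letter) triples; the (freq, -index) prefixes are
  -- pairwise distinct (one entry per letter, first indices distinct), so the third
  -- component is never compared and the two-key sort is exact
  let sorted_pairs := PySem.List.sorted2 reversed_pairs (fun t => t.1) (fun t => t.2.1) true
  let result := sorted_pairs.foldl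
    (fun acc t => acc ++ [String.ofList (PySem.List.pyRepeat [t.2.2] t.1)]) []
  PySem.Str.join "" result

-- ===== PORT B =====
def sort_letters_2_alt (text : String) : String :=
  let counts := text.toList.foldl (fun d ch => d.insert ch (d.getD ch 0 + 1)) PySem.Dict.empty
  let maxf := (PySem.List.max? counts.values (fun v => v)).getD 0
  let parts := (PySem.List.pyRange maxf 0 (-1)).foldl
    (fun acc f => counts.keys.foldl
      (fun acc ch =>
        if counts.getD ch 0 == f then acc ++ [String.ofList (PySem.List.pyRepeat [ch] f)]
        else acc) acc) []
  PySem.Str.join "" parts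

-- ===== PRECONDITION & SPEC =====
def Spec_sort_letters_2 (text : String) (out : String) : Prop := out = sort_letters_2_alt text
instance (text : String) (out : String) : Decidable (Spec_sort_letters_2 text out) := by unfold Spec_sort_letters_2; infer_instance

-- ===== CLAIM (what is proved, stated in full; the proofs are below) =====
def Claim_equal_sort_letters_2 : Prop := ∀ (text : String), Dom_sort_letters_2 text → Spec_sort_letters_2 text (sort_letters_2 text)

-- ===== LEMMAS AND PROOFS =====

-- the strict total key both orders realise: (-frequency, first index)
def pvKB (cs : List Char) (kv : Char × Int) : Lex (Int × Int) := toLex (-kv.2, (cs.idxOf kv.1 : Int))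
-- A's reversed triple
def pvG (cs : List Char) (kv : Char × Int) : Int × Int × Char := (kv.2, -(cs.idxOf kv.1 : Int), kv.1)
-- the string built from one (letter, freq) pair
def pvStr (kv : Char × Int) : String := String.ofList (PySem.List.pyRepeat [kv.1] kv.2)

theorem firstIdx_foldl (cs : List Char) : ∀ (s : Int) (d : PySem.Dict Char Int) (c : Char),
    ((PySem.List.enumerate cs s).foldl
        (fun d p => if !(d.contains p.2) then d.insert p.2 p.1 else d) d).getD c 0
      = if d.contains c then d.getD c 0
        else if c ∈ cs then s + (cs.idxOf c : Int) else 0 := by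
  induction cs with
  | nil =>
    intro s d c
    by_cases h : d.contains c <;>
      simp [PySem.List.enumerate, h, PySem.Dict.getD_of_not_contains]
  | cons x cs ih =>
    intro s d c
    rw [show PySem.List.enumerate (x :: cs) s = (s, x) :: PySem.List.enumerate cs (s+1) from by
      simp [PySem.List.enumerate]]
    simp only [List.foldl_cons]
    by_cases hdx : d.contains x
    · rw [if_neg (by simp [hdx])]
      rw [ih]
      by_cases hdc : d.contains c
      · simp [hdc]
      · rw [if_neg hdc, if_neg hdc]
        by_cases hcx : c = x
        · subst hcx; exact absurd hdx hdc
        · have hbx : (x == c) = false := by simp [Ne.symm hcx]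
          simp only [List.idxOf_cons, hbx, List.mem_cons, hcx, false_or, cond_false]
          by_cases hm : c ∈ cs
          · simp only [hm, if_true]; push_cast; ring
          · simp [hm]
    · rw [if_pos (by simp [hdx])]
      rw [ih]
      rw [PySem.Dict.contains_insert, PySem.Dict.getD_insert]
      by_cases hcx : c = x
      · subst hcx
        simp only [List.idxOf_cons, beq_self_eq_true, cond_true, Nat.cast_zero, add_zero,
          Bool.true_or, if_true, List.mem_cons, true_or]
        rw [if_neg hdx]
      · have hbx : (x == c) = false := by simp [Ne.symm hcx]
        have hbx' : (c == x) = false := by simp [hcx]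
        simp only [hbx', Bool.false_or, List.idxOf_cons, hbx, cond_false,
          List.mem_cons, hcx, false_or]
        by_cases hdc : d.contains c
        · simp [hdc]
        · simp only [hdc, if_false]
          by_cases hm : c ∈ cs
          · simp only [hm, if_true]; push_cast; ring
          · simp [hm]

theorem ofList_pairwise_idxOf (cs : List Char) :
    (PySem.Set.ofList cs).Pairwise (fun a b => cs.idxOf a < cs.idxOf b) := by
  induction cs using List.reverseRecOn with
  | nil => simp [PySem.Set.ofList_nil]
  | append_singleton cs x ih =>
    rw [PySem.Set.ofList_append_singleton]
    have hmem : ∀ a, a ∈ PySem.Set.ofList cs → a ∈ cs := by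
      intro a ha; exact (PySem.Set.mem_ofList cs a).1 ha
    have hpair : (PySem.Set.ofList cs).Pairwise
        (fun a b => (cs ++ [x]).idxOf a < (cs ++ [x]).idxOf b) := by
      refine ih.imp_of_mem ?_
      intro a b ha hb h
      rw [List.idxOf_append, if_pos (hmem a ha), List.idxOf_append, if_pos (hmem b hb)]
      exact h
    by_cases hx : x ∈ PySem.Set.ofList cs
    · rwa [PySem.Set.add_of_mem hx]
    · rw [PySem.Set.add_of_not_mem hx]
      rw [List.pairwise_append]
      refine ⟨hpair, List.pairwise_singleton _ _, ?_⟩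
      intro a ha b hb
      simp only [List.mem_singleton] at hb
      have hxcs : x ∉ cs := fun h => hx ((PySem.Set.mem_ofList cs x).2 h)
      rw [hb, List.idxOf_append, if_pos (hmem a ha), List.idxOf_append, if_neg hxcs]
      have h1 : cs.idxOf a < cs.length := List.idxOf_lt_length_of_mem (hmem a ha)
      have h2 : List.idxOf x [x] = 0 := by simp
      omega

-- sorted2 xs k1 k2 rev = sorted with the lexicographic key (Int keys)
theorem decide_lt_lex {α : Type} (k1 k2 : α → Int) (a b : α) :
    (decide (k1 a < k1 b) || (!decide (k1 b < k1 a) && decide (k2 a < k2 b)))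
      = decide (toLex (k1 a, k2 a) < toLex (k1 b, k2 b)) := by
  by_cases h1 : k1 a < k1 b
  · simp [h1, Prod.Lex.lt_iff]
  · by_cases h1' : k1 b < k1 a
    · simp [h1, h1', Prod.Lex.lt_iff]; omega
    · simp [h1, h1', Prod.Lex.lt_iff]; omega

theorem sorted2_eq_sorted_lex {α : Type} (xs : List α) (k1 k2 : α → Int) (rev : Bool) :
    PySem.List.sorted2 xs k1 k2 rev
      = PySem.List.sorted xs (fun x => toLex (k1 x, k2 x)) rev := by
  cases rev
  · rw [PySem.List.sorted_eq_foldl_insertBy]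
    unfold PySem.List.sorted2
    simp only [if_neg (by decide : ¬ (false = true))]
    congr 1
    funext acc a
    congr 1
    funext p q
    exact decide_lt_lex k1 k2 p q
  · rw [PySem.List.sorted_rev_eq_foldl_insertBy]
    unfold PySem.List.sorted2
    show List.foldl (fun acc x => PySem.List.insertBy
        (fun a b => decide (k1 b < k1 a) || !decide (k1 a < k1 b) && decide (k2 b < k2 a)) x acc) [] xs = _
    congr 1
    funext acc a
    congr 1
    funext p q
    exact decide_lt_lex k1 k2 q p

theorem items_pairwise_idx (cs : List Char) :
    (PySem.Dict.counter cs).items.Pairwise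
      (fun a b => cs.idxOf a.1 < cs.idxOf b.1) := by
  rw [PySem.Dict.items_counter]
  exact (ofList_pairwise_idxOf cs).map _ (fun a b h => h)

-- A's result, characterised: the pairs strictly sorted by pvKB, rendered with pvStr
theorem A_eq_sorted (text : String) :
    sort_letters_2 text
      = PySem.Str.join ""
          ((PySem.List.sorted (PySem.Dict.counter text.toList).items
              (pvKB text.toList) false).map pvStr) := by
  unfold sort_letters_2
  dsimp only
  set cs := text.toList with hcs
  set items := (PySem.Dict.counter cs).items with hitems
  have hdict : ∀ kv ∈ items,
      (kv.2, -(((PySem.List.enumerate cs 0).foldl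
          (fun d p => if !(d.contains p.2) then d.insert p.2 p.1 else d)
          PySem.Dict.empty).getD kv.1 0), kv.1) = pvG cs kv := by
    intro kv hkv
    have hk : kv.1 ∈ cs := by
      rw [hitems, PySem.Dict.items_counter] at hkv
      rcases List.mem_map.1 hkv with ⟨k, hkS, rfl⟩
      exact (PySem.Set.mem_ofList cs k).1 hkS
    rw [firstIdx_foldl cs 0 PySem.Dict.empty kv.1]
    simp [PySem.Dict.contains_empty, hk, pvG]
  rw [List.map_congr_left hdict]
  rw [sorted2_eq_sorted_lex]
  have hAeq : PySem.List.sorted (items.map (pvG cs))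
        (fun x => toLex (x.1, x.2.1)) true
      = (PySem.List.sorted items (pvKB cs) false).map (pvG cs) := by
    apply PySem.List.sorted_rev_eq_of_perm_of_pairwise_gt
    · exact (PySem.List.sorted_perm items (pvKB cs) false).map _
    · have hnodupS : (PySem.Set.ofList cs).Nodup := PySem.Set.nodup_ofList cs
      have hnodup : items.Nodup := by
        rw [hitems, PySem.Dict.items_counter]
        exact hnodupS.map (fun k₁ k₂ h => congrArg Prod.fst h)
      have hBnodup : (PySem.List.sorted items (pvKB cs) false).Nodup :=
        (PySem.List.sorted_perm items (pvKB cs) false).nodup_iff.2 hnodup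
      have hle := PySem.List.sorted_pairwise items (pvKB cs)
      have hne : (PySem.List.sorted items (pvKB cs) false).Pairwise (· ≠ ·) := hBnodup
      have hstrict : (PySem.List.sorted items (pvKB cs) false).Pairwise
          (fun a b => pvKB cs a < pvKB cs b) := by
        refine (hle.and hne).imp_of_mem ?_
        intro a b ha hb ⟨h1, h2⟩
        refine lt_of_le_of_ne h1 ?_
        intro hk
        apply h2
        have hma : a ∈ items := (PySem.List.mem_sorted _ _ _ a).1 ha
        have hmb : b ∈ items := (PySem.List.mem_sorted _ _ _ b).1 hb
        rw [hitems, PySem.Dict.items_counter] at hma hmb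
        rcases List.mem_map.1 hma with ⟨k₁, hk₁, rfl⟩
        rcases List.mem_map.1 hmb with ⟨k₂, hk₂, rfl⟩
        have hpair : ((-(cs.count k₁ : Int)), (cs.idxOf k₁ : Int))
            = ((-(cs.count k₂ : Int)), (cs.idxOf k₂ : Int)) := by
          have := congrArg ofLex hk
          simpa [pvKB] using this
        have hidx : cs.idxOf k₁ = cs.idxOf k₂ := by
          have h2 := congrArg Prod.snd hpair
          simp only at h2
          exact_mod_cast h2
        have hk1cs : k₁ ∈ cs := (PySem.Set.mem_ofList cs k₁).1 hk₁
        have hk2cs : k₂ ∈ cs := (PySem.Set.mem_ofList cs k₂).1 hk₂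
        have hkk : k₁ = k₂ := (List.idxOf_inj (y := k₂) hk1cs).1 hidx
        rw [hkk]
      refine hstrict.map _ ?_
      intro a b h
      simp only [pvKB, Prod.Lex.lt_iff] at h
      simp only [pvG, Prod.Lex.lt_iff]
      simp only [ofLex_toLex] at h ⊢
      rcases h with h | ⟨h1, h2⟩
      · left; omega
      · right; constructor <;> omega
  rw [hAeq]
  rw [PySem.List.foldl_append_singleton_eq_map, List.nil_append, List.map_map]
  rfl

-- concatenating the filters over a duplicate-free list of keys covering l is a permutation of l
theorem flatMap_filter_perm {α : Type} (key : α → Int) :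
    ∀ (fs : List Int) (l : List α), fs.Nodup → (∀ x ∈ l, key x ∈ fs) →
      (fs.flatMap (fun f => l.filter (fun x => key x == f))).Perm l := by
  intro fs
  induction fs with
  | nil =>
    intro l _ hcov
    have : l = [] := List.eq_nil_iff_forall_not_mem.2 (fun x hx => by simpa using hcov x hx)
    simp [this]
  | cons f fs ih =>
    intro l hnd hcov
    rw [List.flatMap_cons]
    have hrest : ∀ g ∈ fs, l.filter (fun x => key x == g)
        = (l.filter (fun x => !(key x == f))).filter (fun x => key x == g) := by
      intro g hg
      have hgf : g ≠ f := fun h => (List.nodup_cons.1 hnd).1 (h ▸ hg)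
      rw [List.filter_filter]
      apply List.filter_congr
      intro x _
      by_cases h : key x = g
      · simp [h, hgf]
      · simp [h]
    have hmap : fs.flatMap (fun g => l.filter (fun x => key x == g))
        = fs.flatMap (fun g => (l.filter (fun x => !(key x == f))).filter (fun x => key x == g)) := by
      rw [List.flatMap_def, List.flatMap_def, List.map_congr_left hrest]
    rw [hmap]
    have hperm := ih (l.filter (fun x => !(key x == f))) (List.nodup_cons.1 hnd).2
      (by
        intro x hx
        have hxl := List.mem_of_mem_filter hx
        have hne : ¬ (key x = f) := by
          have := List.of_mem_filter hx
          simpa using this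
        rcases List.mem_cons.1 (hcov x hxl) with h | h
        · exact absurd h hne
        · exact h)
    exact (List.Perm.append_left _ hperm).trans (List.filter_append_perm _ l)

-- pairwise from a flatMap: inside each block and across blocks
theorem flatMap_pairwise {α : Type} (R : α → α → Prop) (g : Int → List α) :
    ∀ (fs : List Int), (∀ f ∈ fs, (g f).Pairwise R) →
      fs.Pairwise (fun f f' => ∀ a ∈ g f, ∀ b ∈ g f', R a b) →
      (fs.flatMap g).Pairwise R := by
  intro fs
  induction fs with
  | nil => intro _ _; simp
  | cons f fs ih =>
    intro hin hcross
    rw [List.flatMap_cons, List.pairwise_append]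
    refine ⟨hin f (List.mem_cons_self), ih (fun f' hf' => hin f' (List.mem_cons_of_mem f hf'))
      (List.pairwise_cons.1 hcross).2, ?_⟩
    intro a ha b hb
    rcases List.mem_flatMap.1 hb with ⟨f', hf', hbf'⟩
    exact (List.pairwise_cons.1 hcross).1 f' hf' a ha b hbf'

-- B's result, characterised the same way
theorem B_eq_sorted (text : String) :
    sort_letters_2_alt text
      = PySem.Str.join ""
          ((PySem.List.sorted (PySem.Dict.counter text.toList).items
              (pvKB text.toList) false).map pvStr) := by
  unfold sort_letters_2_alt
  dsimp only
  rw [PySem.Dict.foldl_insert_getD_add_one_eq_counter]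
  set cs := text.toList with hcs
  set items := (PySem.Dict.counter cs).items with hitems
  set maxf := (PySem.List.max? (PySem.Dict.counter cs).values (fun v => v)).getD 0 with hmaxf
  -- the inner loop filters one frequency bucket
  have hinner : ∀ (acc : List String) (f : Int),
      (PySem.Dict.counter cs).keys.foldl
        (fun acc ch =>
          if (PySem.Dict.counter cs).getD ch 0 == f
          then acc ++ [String.ofList (PySem.List.pyRepeat [ch] f)] else acc) acc
        = acc ++ ((PySem.Dict.counter cs).keys.filter
            (fun ch => (PySem.Dict.counter cs).getD ch 0 == f)).map
            (fun ch => String.ofList (PySem.List.pyRepeat [ch] f)) := by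
    intro acc f
    exact PySem.List.foldl_append_if _ _ _ _
  have houter : (fun (acc : List String) (f : Int) =>
      (PySem.Dict.counter cs).keys.foldl
        (fun acc ch =>
          if (PySem.Dict.counter cs).getD ch 0 == f
          then acc ++ [String.ofList (PySem.List.pyRepeat [ch] f)] else acc) acc)
      = fun acc f => acc ++ ((PySem.Dict.counter cs).keys.filter
            (fun ch => (PySem.Dict.counter cs).getD ch 0 == f)).map
            (fun ch => String.ofList (PySem.List.pyRepeat [ch] f)) := by
    funext acc f; exact hinner acc f
  rw [houter, PySem.List.foldl_append_eq_flatMap, List.nil_append]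
  -- each bucket, as (letter, freq) pairs drawn from the counter items
  have hbucket : ∀ f : Int,
      ((PySem.Dict.counter cs).keys.filter
          (fun ch => (PySem.Dict.counter cs).getD ch 0 == f)).map
          (fun ch => String.ofList (PySem.List.pyRepeat [ch] f))
        = (items.filter (fun kv => kv.2 == f)).map pvStr := by
    intro f
    rw [hitems, PySem.Dict.items_counter, List.filter_map, List.map_map,
      PySem.Dict.keys_counter]
    have hpred : ∀ ch, ((PySem.Dict.counter cs).getD ch 0 == f)
        = (((fun kv : Char × Int => kv.2 == f) ∘ fun k => (k, (cs.count k : Int))) ch) := by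
      intro ch; simp [PySem.Dict.getD_counter]
    rw [show (fun ch => (PySem.Dict.counter cs).getD ch 0 == f)
        = ((fun kv : Char × Int => kv.2 == f) ∘ fun k => (k, (cs.count k : Int))) from
      funext hpred]
    apply List.map_congr_left
    intro ch hch
    have : (cs.count ch : Int) = f := by
      have := List.of_mem_filter hch
      simpa using this
    simp [pvStr, Function.comp, this]
  have hflat : (PySem.List.pyRange maxf 0 (-1)).flatMap
      (fun f => ((PySem.Dict.counter cs).keys.filter
          (fun ch => (PySem.Dict.counter cs).getD ch 0 == f)).map
          (fun ch => String.ofList (PySem.List.pyRepeat [ch] f)))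
      = ((PySem.List.pyRange maxf 0 (-1)).flatMap
          (fun f => items.filter (fun kv => kv.2 == f))).map pvStr := by
    rw [List.map_flatMap]
    rw [List.flatMap_def, List.flatMap_def]
    exact congrArg List.flatten (List.map_congr_left (fun f _ => hbucket f))
  rw [hflat]
  -- the bucket concatenation IS the strictly pvKB-sorted item list
  have hP : PySem.List.sorted items (pvKB cs) false
      = (PySem.List.pyRange maxf 0 (-1)).flatMap (fun f => items.filter (fun kv => kv.2 == f)) := by
    apply PySem.List.sorted_eq_of_perm_of_pairwise_lt
    · -- permutation: the buckets partition the items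
      apply flatMap_filter_perm (fun kv : Char × Int => kv.2)
      · rw [PySem.List.pyRange_neg_one_eq_reverse]
        exact List.nodup_reverse.2 (PySem.List.nodup_pyRange_one _ _)
      · intro kv hkv
        rw [PySem.List.mem_pyRange_neg_one]
        have hkvs : kv ∈ items := hkv
        rw [hitems, PySem.Dict.items_counter] at hkvs
        rcases List.mem_map.1 hkvs with ⟨k, hkS, rfl⟩
        have hkcs : k ∈ cs := (PySem.Set.mem_ofList cs k).1 hkS
        constructor
        · show (0 : Int) < (cs.count k : Int)
          exact_mod_cast List.count_pos_iff.2 hkcs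
        · -- kv.2 occurs among the values, hence is at most the maximum
          have hv : (cs.count k : Int) ∈ (PySem.Dict.counter cs).values := by
            have : ((k, (cs.count k : Int)) : Char × Int) ∈ items := hkv
            rw [hitems] at this
            exact List.mem_map.2 ⟨_, this, rfl⟩
          have hne : (PySem.Dict.counter cs).values ≠ [] := by
            intro h; rw [h] at hv; exact absurd hv (List.not_mem_nil)
          rcases Option.ne_none_iff_exists'.1
              ((not_iff_not.2 (PySem.List.max?_eq_none_iff
                (PySem.Dict.counter cs).values (fun v => v))).2 hne) with ⟨m, hm⟩
          have := PySem.List.max?_isMax hm _ hv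
          rw [hmaxf, hm]
          simpa using this
    · -- strictly increasing in pvKB: descending frequencies, first index inside a bucket
      apply flatMap_pairwise
      · intro f _
        have hfil : (items.filter (fun kv => kv.2 == f)).Pairwise
            (fun a b => cs.idxOf a.1 < cs.idxOf b.1) :=
          (items_pairwise_idx cs).filter _
        refine hfil.imp_of_mem ?_
        intro a b ha hb hidx
        have ha2 : a.2 = f := by simpa using List.of_mem_filter ha
        have hb2 : b.2 = f := by simpa using List.of_mem_filter hb
        simp only [pvKB, Prod.Lex.lt_iff, ofLex_toLex]
        right
        exact ⟨by omega, by exact_mod_cast hidx⟩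
      · have hrange : (PySem.List.pyRange maxf 0 (-1)).Pairwise (fun a b => b < a) := by
          rw [PySem.List.pyRange_neg_one_eq_reverse]
          rw [List.pairwise_reverse]
          exact PySem.List.pairwise_lt_pyRange_one _ _
        refine hrange.imp_of_mem ?_
        intro f f' _ _ hlt a ha b hb
        have ha2 : a.2 = f := by simpa using List.of_mem_filter ha
        have hb2 : b.2 = f' := by simpa using List.of_mem_filter hb
        simp only [pvKB, Prod.Lex.lt_iff, ofLex_toLex]
        left; omega
  rw [← hP]

-- ===== VERDICT (by name: the statement is the Claim_ definition above) =====
theorem sort_letters_2_spec : Claim_equal_sort_letters_2 := by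
  intro text _
  unfold Spec_sort_letters_2
  rw [A_eq_sorted, B_eq_sorted]
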